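-- pv_equiv track=rewrite | github.com/unhappydog/kb_demo | online_processor/scripts/MoveDataFromMysql2Mongo.py | exetract_info
-- ===== SOURCE A (Python) =====
-- def exetract_info(doc, col_names):
--     temp_list = []
--     result = []
--     for col_name in col_names:
--         temp_list.append(doc[col_name].split("|"))
--         del doc[col_name]
--     infos = zip(*temp_list)
--     for k_v in infos:
--         temp = {}
--         for i in range(0, len(col_names)):
--             if k_v[i] == "":
--                 continue
--             temp[col_names[i]] = k_v[i]
--         if temp == {}:
--             continue
--         result.append(temp)
--     return result
-- ===== SOURCE B (Python) =====
-- def exetract_info(doc, col_names):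
--     # Pop+split each named column, then recursively peel one row off the front of
--     # every column per step (no zip, no indices); recursion stops when a column
--     # runs out, which reproduces truncation to the shortest column.
--     pairs = [(name, doc.pop(name).split("|")) for name in col_names]
--
--     def walk(pairs):
--         if not pairs or any(not col for _, col in pairs):
--             return []
--         row = {name: col[0] for name, col in pairs if col[0] != ""}
--         rest = walk([(name, col[1:]) for name, col in pairs])
--         return ([row] if row else []) + rest
--
--     return walk(pairs)
-- ===== Notes on version B (the rewrite author's own statement) =====
-- stated objective: alternative
-- what changed: replaces A's iterative zip(*cols) transpose plus per-row index loop over range(len(col_names)) with a recursive head-peeling pass: each recursive step takes the first element of every (name, column) pair to build one row dict and recurses on the column tails, stopping when a column is exhausted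
import Mathlib
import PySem

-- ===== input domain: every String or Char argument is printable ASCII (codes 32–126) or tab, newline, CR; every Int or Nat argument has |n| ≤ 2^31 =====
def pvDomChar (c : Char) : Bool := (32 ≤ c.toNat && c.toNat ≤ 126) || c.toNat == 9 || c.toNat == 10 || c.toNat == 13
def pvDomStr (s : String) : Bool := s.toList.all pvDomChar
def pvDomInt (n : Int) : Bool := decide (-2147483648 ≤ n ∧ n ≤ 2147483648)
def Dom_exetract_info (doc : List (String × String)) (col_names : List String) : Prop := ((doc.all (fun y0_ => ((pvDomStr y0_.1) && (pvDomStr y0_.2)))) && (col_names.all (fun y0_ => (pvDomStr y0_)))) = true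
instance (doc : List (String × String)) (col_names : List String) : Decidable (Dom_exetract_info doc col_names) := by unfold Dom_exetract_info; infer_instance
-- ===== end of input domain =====

-- B replaces A's zip(*cols) transpose + per-row index loop with a recursive head-peeling pass
-- (objective: alternative, same cost). Both A and B delete the consumed keys from doc (A: del,
-- B: pop); the equivalence proved is about the return value.

-- ===== PORT A =====
-- termination helper for the zip(*…) transpose below
theorem pvSumTailLe : ∀ (ls : List (List String)),
    (ls.map (fun x => x.length - 1)).sum ≤ (ls.map List.length).sum := by
  intro ls
  induction ls with
  | nil => simp
  | cons c rest ih =>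
    simp only [List.map_cons, List.sum_cons]
    omega

theorem pvSumTailLt (ls : List (List String)) (h1 : ¬ ls = [])
    (h2 : ¬ ls.any List.isEmpty = true) :
    (ls.map (fun x => x.length - 1)).sum < (ls.map List.length).sum := by
  cases ls with
  | nil => exact absurd rfl h1
  | cons c rest =>
    simp only [List.any_cons, Bool.or_eq_true, not_or] at h2
    have hc : c ≠ [] := by
      intro hc; subst hc; simp at h2
    have hcl : 0 < c.length := by cases c with
      | nil => exact absurd rfl hc
      | cons x xs => simp
    have := pvSumTailLe rest
    simp only [List.map_cons, List.sum_cons]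
    omega

-- exact port of Python's zip(*temp_list): transpose truncated at the shortest list; zip() of an
-- empty argument list yields nothing
def pyZipStar (ls : List (List String)) : List (List String) :=
  if h : ls = [] ∨ ls.any List.isEmpty = true then []
  else (ls.map (fun c => c.headD "")) :: pyZipStar (ls.map List.tail)
termination_by (ls.map List.length).sum
decreasing_by
  push_neg at h
  have he : (List.length ∘ List.tail : List String → Nat) = fun x => x.length - 1 := by
    funext x; cases x <;> simp
  simpa [he] using pvSumTailLt ls h.1 h.2

def exetract_info (doc : List (String × String)) (col_names : List String) : List (List (String × String)) :=
  -- temp_list = []; for col_name in col_names: temp_list.append(doc[col_name].split("|")); del doc[col_name]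
  -- doc[col_name] raises KeyError when absent: Pre_ excludes that; total form via getD "".
  -- split? is some because the separator "|" is non-empty.
  let st := col_names.foldl
    (fun (st : List (List String) × PySem.Dict String String) col_name =>
      (st.1 ++ [(PySem.Str.split? ((st.2.get? col_name).getD "") "|").getD []], st.2.erase col_name))
    ([], PySem.Dict.mk doc)
  let temp_list := st.1
  let infos := pyZipStar temp_list
  -- for k_v in infos: temp = {}; for i in range(0, len(col_names)): …; if temp == {}: continue; result.append(temp)
  infos.foldl
    (fun result k_v =>
      let temp := (PySem.List.pyRange 0 (PySem.List.len col_names)).foldl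
        (fun (temp : PySem.Dict String String) i =>
          if PySem.List.pyGetD k_v i "" = "" then temp
          else temp.insert (PySem.List.pyGetD col_names i "") (PySem.List.pyGetD k_v i ""))
        PySem.Dict.empty
      if temp.items = [] then result else result ++ [temp.items])
    []

-- ===== PORT B =====
-- walk(pairs): recursion peeling the head element off every column; col[0] is headD "" (the
-- guard ensures every column is non-empty there), col[1:] is List.tail (Prod.map id List.tail
-- builds the (name, col[1:]) pair).
-- row = {name: col[0] for name, col in pairs if col[0] != ""}
def pvRowOf (pairs : List (String × List String)) : PySem.Dict String String :=
  pairs.foldl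
    (fun (t : PySem.Dict String String) p =>
      if p.2.headD "" = "" then t else t.insert p.1 (p.2.headD ""))
    PySem.Dict.empty

-- the recursion argument [(name, col[1:]) for name, col in pairs] as a named helper
def pvTails (pairs : List (String × List String)) : List (String × List String) :=
  pairs.map (Prod.map id List.tail)

def pvWalk (pairs : List (String × List String)) : List (List (String × String)) :=
  if h : pairs = [] ∨ pairs.any (fun p => p.2.isEmpty) = true then []
  else
    -- rest = walk([(name, col[1:]) for name, col in pairs]); return ([row] if row else []) + rest
    (if (pvRowOf pairs).items.isEmpty then [] else [(pvRowOf pairs).items])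
      ++ pvWalk (pvTails pairs)
termination_by ((pairs.map Prod.snd).map List.length).sum
decreasing_by
  push_neg at h
  simp only [pvTails]
  have h1 : pairs.map Prod.snd ≠ [] := by
    intro he; exact h.1 (List.map_eq_nil_iff.mp he)
  have h2 : ¬ (pairs.map Prod.snd).any List.isEmpty = true := by
    intro ha
    rw [List.any_map] at ha
    exact h.2 ha
  have he : ((pairs.map (Prod.map id List.tail)).map Prod.snd)
      = (pairs.map Prod.snd).map List.tail := by
    simp [List.map_map, Function.comp, Prod.map]
  rw [he]
  have ht : ((pairs.map Prod.snd).map List.tail).map List.length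
      = (pairs.map Prod.snd).map (fun x => x.length - 1) := by
    rw [List.map_map]
    apply List.map_congr_left
    intro x _
    cases x <;> simp
  rw [ht]
  exact pvSumTailLt (pairs.map Prod.snd) h1 h2

def exetract_info_alt (doc : List (String × String)) (col_names : List String) : List (List (String × String)) :=
  -- pairs = [(name, doc.pop(name).split("|")) for name in col_names]  (pop = lookup then remove;
  -- KeyError excluded by Pre_; total form via getD "")
  let st := col_names.foldl
    (fun (st : List (String × List String) × PySem.Dict String String) name =>
      (st.1 ++ [(name, (PySem.Str.split? ((st.2.get? name).getD "") "|").getD [])], st.2.erase name))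
    ([], PySem.Dict.mk doc)
  pvWalk st.1

-- ===== PRECONDITION & SPEC =====
-- Pre_ excludes exactly the inputs on which the Python A raises KeyError: a col_name absent from
-- doc, or repeated in col_names (the second del of the same key fails).
def Pre_exetract_info (doc : List (String × String)) (col_names : List String) : Prop :=
  col_names.Nodup ∧ ∀ n ∈ col_names, n ∈ doc.map Prod.fst
instance (doc : List (String × String)) (col_names : List String) : Decidable (Pre_exetract_info doc col_names) := by unfold Pre_exetract_info; infer_instance

def pvWitness_exetract_info : (List (String × String)) × List String :=
  ([("a", "1|2"), ("b", "x|"), ("c", "zz")], ["a", "b"])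

def Spec_exetract_info (doc : List (String × String)) (col_names : List String) (out : List (List (String × String))) : Prop := out = exetract_info_alt doc col_names
instance (doc : List (String × String)) (col_names : List String) (out : List (List (String × String))) : Decidable (Spec_exetract_info doc col_names out) := by unfold Spec_exetract_info; infer_instance

-- ===== CLAIM (what is proved, stated in full; the proofs are below) =====
def Claim_equal_exetract_info : Prop := ∀ (doc : List (String × String)) (col_names : List String), Dom_exetract_info doc col_names → Pre_exetract_info doc col_names → Spec_exetract_info doc col_names (exetract_info doc col_names)

-- ===== LEMMAS AND PROOFS =====

-- canonical row count: min of the column lengths, 0 if there are no columns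
def pvRows (cols : List (List String)) : Nat := PySem.List.minD (cols.map List.length) id 0

-- canonical dict for row i
def pvRow (names : List String) (cols : List (List String)) (i : Nat) : PySem.Dict String String :=
  (names.zip cols).foldl
    (fun t p => if p.2.getD i "" = "" then t else t.insert p.1 (p.2.getD i ""))
    PySem.Dict.empty

-- canonical result of phase 1: the split columns, in col_names order, threading the erases
def pvCols : List String → PySem.Dict String String → List (List String)
  | [], _ => []
  | n :: ns, d => (PySem.Str.split? ((d.get? n).getD "") "|").getD [] :: pvCols ns (d.erase n)

-- ---- pvRows facts ----
theorem pvFoldlMin_le_init : ∀ (l : List Nat) (m : Nat), l.foldl Nat.min m ≤ m := by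
  intro l
  induction l with
  | nil => intro m; simp
  | cons x l ih =>
    intro m
    simp only [List.foldl_cons]
    exact le_trans (ih _) (Nat.min_le_left _ _)

theorem pvFoldlMin_le_mem : ∀ (l : List Nat) (m x : Nat), x ∈ l → l.foldl Nat.min m ≤ x := by
  intro l
  induction l with
  | nil => intro m x hx; simp at hx
  | cons y l ih =>
    intro m x hx
    rcases List.mem_cons.mp hx with h | h
    · subst h
      simp only [List.foldl_cons]
      exact le_trans (pvFoldlMin_le_init l _) (Nat.min_le_right _ _)
    · exact ih _ x h

theorem pvFoldlMin_pos : ∀ (l : List Nat) (m : Nat), 0 < m → (∀ x ∈ l, 0 < x) →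
    0 < l.foldl Nat.min m := by
  intro l
  induction l with
  | nil => intro m hm _; simpa using hm
  | cons x l ih =>
    intro m hm hl
    simp only [List.foldl_cons]
    have hx : 0 < x := hl x (List.mem_cons_self ..)
    exact ih _ (lt_min hm hx) (fun y hy => hl y (List.mem_cons_of_mem _ hy))

theorem pvMin?_cons : ∀ (l : List Nat) (x : Nat),
    PySem.List.min? (x :: l) (id : Nat → Nat) = some (l.foldl Nat.min x) := by
  intro l
  induction l with
  | nil => intro x; rfl
  | cons y l ih =>
    intro x
    have hxy : PySem.List.min? (x :: y :: l) (id : Nat → Nat)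
        = PySem.List.min? (Nat.min x y :: l) (id : Nat → Nat) := by
      unfold PySem.List.min?
      simp only [List.foldl_cons]
      congr 1
      show (if id y < id x then some y else some x) = some (Nat.min x y)
      simp only [id, Nat.min_def]
      split_ifs <;> simp only [Option.some.injEq] <;> omega
    rw [hxy, ih]
    simp only [List.foldl_cons]

theorem pvRows_cons (c : List String) (cs : List (List String)) :
    pvRows (c :: cs) = (cs.map List.length).foldl Nat.min c.length := by
  unfold pvRows PySem.List.minD
  simp only [List.map_cons]
  rw [pvMin?_cons]
  simp

theorem pvRows_zero_of_empty_mem (cols : List (List String)) (h : cols.any List.isEmpty = true) :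
    pvRows cols = 0 := by
  cases cols with
  | nil => rfl
  | cons c cs =>
    rw [pvRows_cons]
    simp only [List.any_cons, Bool.or_eq_true, List.any_eq_true, List.isEmpty_iff] at h
    rcases h with h | ⟨x, hx, hxe⟩
    · have h0 : c.length = 0 := by simp [h]
      have := pvFoldlMin_le_init (cs.map List.length) c.length
      omega
    · have hx0 : (0 : Nat) ∈ cs.map List.length := by
        exact List.mem_map.mpr ⟨x, hx, by simp [hxe]⟩
      have := pvFoldlMin_le_mem (cs.map List.length) c.length 0 hx0
      omega

theorem pvFoldlMin_sub_one : ∀ (l : List Nat) (m : Nat),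
    (l.map (fun x => x - 1)).foldl Nat.min (m - 1) = l.foldl Nat.min m - 1 := by
  intro l
  induction l with
  | nil => intro m; simp
  | cons x l ih =>
    intro m
    simp only [List.map_cons, List.foldl_cons]
    have h : Nat.min (m - 1) (x - 1) = Nat.min m x - 1 := by
      simp only [Nat.min_def]
      split_ifs <;> omega
    rw [h, ih]

theorem pvRows_tail (cols : List (List String)) (h1 : ¬ cols = [])
    (h2 : ¬ cols.any List.isEmpty = true) :
    pvRows (cols.map List.tail) = pvRows cols - 1 := by
  cases cols with
  | nil => exact absurd rfl h1
  | cons c cs =>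
    simp only [List.map_cons]
    rw [pvRows_cons, pvRows_cons]
    have e1 : (cs.map List.tail).map List.length = (cs.map List.length).map (fun x => x - 1) := by
      simp only [List.map_map]
      apply List.map_congr_left
      intro x _
      simp
    have e2 : c.tail.length = c.length - 1 := by cases c <;> simp
    rw [e1, e2, pvFoldlMin_sub_one]

theorem pvRows_pos (cols : List (List String)) (h1 : ¬ cols = [])
    (h2 : ¬ cols.any List.isEmpty = true) : 0 < pvRows cols := by
  cases cols with
  | nil => exact absurd rfl h1
  | cons c cs =>
    rw [pvRows_cons]
    simp only [List.any_cons, Bool.or_eq_true, not_or, List.any_eq_true, not_exists] at h2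
    obtain ⟨hc, hcs⟩ := h2
    apply pvFoldlMin_pos
    · have : ¬ c = [] := by simpa [List.isEmpty_iff] using hc
      cases c with
      | nil => exact absurd rfl this
      | cons _ _ => simp
    · intro x hx
      obtain ⟨y, hy, rfl⟩ := List.mem_map.mp hx
      have hne : ¬ y = [] := by
        intro hnil
        exact (hcs y) ⟨hy, by simp [hnil]⟩
      cases y with
      | nil => exact absurd rfl hne
      | cons _ _ => simp

-- ---- zip(*…) characterisation ----
theorem pvTail_getD (c : List String) (i : Nat) : c.tail.getD i "" = c.getD (i + 1) "" := by
  cases c <;> simp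

theorem pyZipStar_spec : ∀ (cols : List (List String)),
    pyZipStar cols = (List.range (pvRows cols)).map (fun i => cols.map (fun c => c.getD i "")) := by
  intro cols
  induction cols using pyZipStar.induct with
  | case1 cols h =>
    rw [pyZipStar, dif_pos h]
    rcases h with h | h
    · subst h; rfl
    · rw [pvRows_zero_of_empty_mem cols h]; rfl
  | case2 cols h ih =>
    rw [pyZipStar, dif_neg h]
    push_neg at h
    obtain ⟨h1, h2⟩ := h
    have ihc : pyZipStar (cols.map List.tail)
        = (List.range (pvRows (cols.map List.tail))).map
            (fun i => (cols.map List.tail).map (fun c => c.getD i "")) := by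
      simpa using ih
    have hpos := pvRows_pos cols h1 h2
    obtain ⟨k, hk⟩ : ∃ k, pvRows cols = k + 1 := ⟨pvRows cols - 1, by omega⟩
    have htail : pvRows (cols.map List.tail) = k := by
      rw [pvRows_tail cols h1 h2, hk]
      omega
    rw [ihc, htail, hk, List.range_succ_eq_map]
    rw [List.map_cons, List.map_map]
    congr 1
    · apply List.map_congr_left
      intro c _
      cases c <;> simp
    · apply List.map_congr_left
      intro i _
      simp only [Function.comp, List.map_map]
      apply List.map_congr_left
      intro c _
      simp only [Function.comp]
      rw [pvTail_getD]

-- ---- A's inner row fold = pvRow ----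
theorem pvFoldlRange2 {σ : Type} : ∀ (as_ : List String) (bs : List String)
    (g : σ → String → String → σ) (init : σ), as_.length = bs.length →
    (List.range as_.length).foldl (fun t j => g t (as_.getD j "") (bs.getD j "")) init
      = (as_.zip bs).foldl (fun t p => g t p.1 p.2) init := by
  intro as_
  induction as_ with
  | nil => intro bs g init h; simp
  | cons a as ih =>
    intro bs g init h
    cases bs with
    | nil => simp at h
    | cons b bs' =>
      have h' : as.length = bs'.length := by simpa using h
      simp only [List.length_cons, List.range_succ_eq_map, List.foldl_cons, List.foldl_map,
        List.zip_cons_cons, List.getD_cons_zero, Nat.succ_eq_add_one, List.getD_cons_succ]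
      exact ih bs' g (g init a b) h'

theorem pvRowA (names : List String) (cols : List (List String)) (i : Nat)
    (hlen : cols.length = names.length) :
    (PySem.List.pyRange 0 (PySem.List.len names)).foldl
      (fun (temp : PySem.Dict String String) j =>
        if PySem.List.pyGetD (cols.map (fun c => c.getD i "")) j "" = "" then temp
        else temp.insert (PySem.List.pyGetD names j "")
          (PySem.List.pyGetD (cols.map (fun c => c.getD i "")) j ""))
      PySem.Dict.empty = pvRow names cols i := by
  have hb : names.length = (cols.map (fun c => c.getD i "")).length := by simp [hlen]
  have hlenI : PySem.List.len names = (names.length : Int) := by simp [PySem.List.len]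
  rw [hlenI, PySem.List.pyRange_zero_natCast, List.foldl_map]
  simp only [PySem.List.pyGetD_natCast]
  rw [pvFoldlRange2 names (cols.map (fun c => c.getD i ""))
    (fun t a b => if b = "" then t else t.insert a b) PySem.Dict.empty hb]
  rw [List.zip_map_right, List.foldl_map]
  rfl

-- ---- A's result = canonical filtered rows ----
-- bridge to PySem.List.foldl_append_if: A's loop tests 'temp == {}' with the skip branch first
theorem pvFoldlAppendNe {g : Type} (l : List g) (F : g → List (String × String))
    (acc : List (List (String × String))) :
    l.foldl (fun res kv => if F kv = [] then res else res ++ [F kv]) acc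
      = acc ++ (l.map F).filter (fun x => !x.isEmpty) := by
  have hfun : (fun (res : List (List (String × String))) kv =>
        if F kv = [] then res else res ++ [F kv])
      = (fun res kv => if (!(F kv).isEmpty) then res ++ [F kv] else res) := by
    funext res kv
    by_cases hk : F kv = [] <;> simp [hk]
  rw [hfun, PySem.List.foldl_append_if]
  congr 1
  rw [List.filter_map]
  rfl

theorem pvGather (names : List String) (cols : List (List String)) (hlen : cols.length = names.length) :
    (pyZipStar cols).foldl
      (fun result k_v =>
        if ((PySem.List.pyRange 0 (PySem.List.len names)).foldl
          (fun (temp : PySem.Dict String String) i =>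
            if PySem.List.pyGetD k_v i "" = "" then temp
            else temp.insert (PySem.List.pyGetD names i "") (PySem.List.pyGetD k_v i ""))
          PySem.Dict.empty).items = [] then result
        else result ++ [((PySem.List.pyRange 0 (PySem.List.len names)).foldl
          (fun (temp : PySem.Dict String String) i =>
            if PySem.List.pyGetD k_v i "" = "" then temp
            else temp.insert (PySem.List.pyGetD names i "") (PySem.List.pyGetD k_v i ""))
          PySem.Dict.empty).items])
      []
    = ((List.range (pvRows cols)).map (fun i => (pvRow names cols i).items)).filter (fun x => !x.isEmpty) := by
  rw [pvFoldlAppendNe (pyZipStar cols)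
    (fun k_v => ((PySem.List.pyRange 0 (PySem.List.len names)).foldl
      (fun (temp : PySem.Dict String String) i =>
        if PySem.List.pyGetD k_v i "" = "" then temp
        else temp.insert (PySem.List.pyGetD names i "") (PySem.List.pyGetD k_v i ""))
      PySem.Dict.empty).items) []]
  rw [List.nil_append, pyZipStar_spec, List.map_map]
  apply congrArg
  apply List.map_congr_left
  intro i _
  simp only [Function.comp]
  rw [pvRowA names cols i hlen]

-- ---- B's recursion = canonical filtered rows ----
theorem pvHeadD_getD (l : List String) (d : String) : l.headD d = l.getD 0 d := by
  cases l <;> simp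

theorem pvRow_tail (names : List String) (cols : List (List String)) (i : Nat) :
    pvRow names (cols.map List.tail) i = pvRow names cols (i + 1) := by
  unfold pvRow
  rw [List.zip_map_right, List.foldl_map]
  apply PySem.List.foldl_congr_mem
  intro t p _
  simp only [Prod.map]
  rw [pvTail_getD]
  rfl

theorem pvWalk_spec : ∀ (pairs : List (String × List String)) (names : List String)
    (cols : List (List String)), names.length = cols.length → pairs = names.zip cols →
    pvWalk pairs
      = ((List.range (pvRows cols)).map (fun i => (pvRow names cols i).items)).filter
          (fun x => !x.isEmpty) := by
  intro pairs
  induction pairs using pvWalk.induct with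
  | case1 pairs h =>
    intro names cols hlen hzip
    rw [pvWalk, dif_pos h]
    rcases h with h | h
    · subst hzip
      rcases List.zip_eq_nil_iff.mp h with h' | h'
      · have : cols = [] := by
          have := hlen; rw [h'] at this; exact List.length_eq_zero_iff.mp this.symm
        subst this; rfl
      · subst h'; rfl
    · subst hzip
      obtain ⟨p, hp, hpe⟩ := List.any_eq_true.mp h
      have hcany : cols.any List.isEmpty = true :=
        List.any_eq_true.mpr ⟨p.2, (List.of_mem_zip hp).2, hpe⟩
      rw [pvRows_zero_of_empty_mem cols hcany]
      rfl
  | case2 pairs h ih =>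
    intro names cols hlen hzip
    rw [pvWalk, dif_neg h]
    push_neg at h
    obtain ⟨hne, hnoany⟩ := h
    subst hzip
    have hcne : cols ≠ [] := by
      intro hc; subst hc; simp at hne
    have hsnd : (names.zip cols).map Prod.snd = cols :=
      List.map_snd_zip (le_of_eq hlen.symm)
    have hcnoany : ¬ cols.any List.isEmpty = true := by
      intro hc
      obtain ⟨c, hc1, hc2⟩ := List.any_eq_true.mp hc
      rw [← hsnd] at hc1
      obtain ⟨p, hp1, hp2⟩ := List.mem_map.mp hc1
      exact hnoany (List.any_eq_true.mpr ⟨p, hp1, by rw [hp2]; exact hc2⟩)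
    have hpos := pvRows_pos cols hcne hcnoany
    obtain ⟨k, hk⟩ : ∃ k, pvRows cols = k + 1 := ⟨pvRows cols - 1, by omega⟩
    -- the head row is pvRow names cols 0
    have hrow : pvRowOf (names.zip cols) = pvRow names cols 0 := by
      unfold pvRowOf pvRow
      apply PySem.List.foldl_congr_mem
      intro t p _
      rw [pvHeadD_getD]
    -- the recursive call yields rows 1..k
    have htz : pvTails (names.zip cols) = names.zip (cols.map List.tail) := by
      rw [pvTails]
      exact List.zip_map_right.symm
    have hrest := ih names (cols.map List.tail) (by simpa using hlen) htz
    have hrows' : pvRows (cols.map List.tail) = k := by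
      rw [pvRows_tail cols hcne hcnoany, hk]
      omega
    rw [hrest, hrows', hrow, hk, List.range_succ_eq_map, List.map_cons, List.filter_cons,
      List.map_map]
    have hmaps : (List.range k).map ((fun i => (pvRow names cols i).items) ∘ Nat.succ)
        = (List.range k).map (fun i => (pvRow names (cols.map List.tail) i).items) := by
      apply List.map_congr_left
      intro i _
      simp only [Function.comp]
      rw [pvRow_tail]
    rw [hmaps]
    by_cases hempty : (pvRow names cols 0).items.isEmpty
    · simp [hempty]
    · simp [hempty]

-- ---- phase 1: both folds produce pvCols (B paired with the names) ----
theorem pvPhaseA : ∀ (names : List String) (acc : List (List String))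
    (d : PySem.Dict String String),
    (names.foldl
      (fun (st : List (List String) × PySem.Dict String String) col_name =>
        (st.1 ++ [(PySem.Str.split? ((st.2.get? col_name).getD "") "|").getD []], st.2.erase col_name))
      (acc, d)).1 = acc ++ pvCols names d := by
  intro names
  induction names with
  | nil => intro acc d; simp [pvCols]
  | cons n ns ih =>
    intro acc d
    simp only [List.foldl_cons, pvCols]
    rw [ih]
    simp

theorem pvPhaseB : ∀ (names : List String) (acc : List (String × List String))
    (d : PySem.Dict String String),
    (names.foldl
      (fun (st : List (String × List String) × PySem.Dict String String) name =>
        (st.1 ++ [(name, (PySem.Str.split? ((st.2.get? name).getD "") "|").getD [])], st.2.erase name))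
      (acc, d)).1 = acc ++ names.zip (pvCols names d) := by
  intro names
  induction names with
  | nil => intro acc d; simp
  | cons n ns ih =>
    intro acc d
    simp only [List.foldl_cons, pvCols, List.zip_cons_cons]
    rw [ih]
    simp

theorem pvColsLen : ∀ (names : List String) (d : PySem.Dict String String),
    (pvCols names d).length = names.length := by
  intro names
  induction names with
  | nil => intro d; rfl
  | cons n ns ih => intro d; simp [pvCols, ih]

theorem pvMain (doc : List (String × String)) (col_names : List String) :
    exetract_info doc col_names = exetract_info_alt doc col_names := by
  simp only [exetract_info, exetract_info_alt]
  rw [pvPhaseA col_names [] (PySem.Dict.mk doc), pvPhaseB col_names [] (PySem.Dict.mk doc),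
    List.nil_append, List.nil_append]
  rw [pvGather col_names (pvCols col_names (PySem.Dict.mk doc))
    (by rw [pvColsLen])]
  rw [pvWalk_spec (col_names.zip (pvCols col_names (PySem.Dict.mk doc))) col_names
    (pvCols col_names (PySem.Dict.mk doc)) (by rw [pvColsLen]) rfl]

-- ===== VERDICT (by name: the statement is the Claim_ definition above) =====
theorem exetract_info_spec : Claim_equal_exetract_info := by
  intro doc col_names _ _
  unfold Spec_exetract_info
  exact pvMain doc col_names
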